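-- pv_equiv track=rewrite | github.com/Ailp117/DMW-Bot | services/backup_service.py | _ordered_table_names
-- ===== SOURCE A (Python) =====
-- from typing import Iterable, Mapping
--
-- _PREFERRED_INSERT_ORDER = (
--     "guild_settings",
--     "dungeons",
--     "raids",
--     "raid_options",
--     "raid_votes",
--     "raid_posted_slots",
--     "raid_templates",
--     "raid_attendance",
--     "user_levels",
--     "debug_mirror_cache",
-- )
--
-- def _ordered_table_names(rows_by_table: Mapping[str, Iterable[Mapping[str, object]]]) -> tuple[list[str], list[str]]:
--     table_names = [table_name for table_name, _ in rows_by_table.items()]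
--     available = set(table_names)
--     preferred = [name for name in _PREFERRED_INSERT_ORDER if name in available]
--     extras = sorted(name for name in available if name not in set(_PREFERRED_INSERT_ORDER))
--
--     insert_order = preferred + extras
--     delete_order = list(reversed(insert_order))
--     return delete_order, insert_order
-- ===== SOURCE B (Python) =====
-- _PREFERRED_INSERT_ORDER = (
--     "guild_settings",
--     "dungeons",
--     "raids",
--     "raid_options",
--     "raid_votes",
--     "raid_posted_slots",
--     "raid_templates",
--     "raid_attendance",
--     "user_levels",
--     "debug_mirror_cache",
-- )
--
-- def _ordered_table_names(rows_by_table):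
--     n = len(_PREFERRED_INSERT_ORDER)
--     rank = {name: i for i, name in enumerate(_PREFERRED_INSERT_ORDER)}
--     insert_order = sorted(
--         rows_by_table,
--         key=lambda name: (rank.get(name, n), "" if name in rank else name),
--     )
--     return insert_order[::-1], insert_order
-- ===== Notes on version B (the rewrite author's own statement) =====
-- stated objective: alternative
-- what changed: Replaces A's two passes (filter the preferred tuple by membership, then sort the leftover set and concatenate) with a single sorted() over the table names keyed by a precomputed rank dictionary, with (rank, '') for preferred names and (len(preferred), name) for extras.
import Mathlib
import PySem

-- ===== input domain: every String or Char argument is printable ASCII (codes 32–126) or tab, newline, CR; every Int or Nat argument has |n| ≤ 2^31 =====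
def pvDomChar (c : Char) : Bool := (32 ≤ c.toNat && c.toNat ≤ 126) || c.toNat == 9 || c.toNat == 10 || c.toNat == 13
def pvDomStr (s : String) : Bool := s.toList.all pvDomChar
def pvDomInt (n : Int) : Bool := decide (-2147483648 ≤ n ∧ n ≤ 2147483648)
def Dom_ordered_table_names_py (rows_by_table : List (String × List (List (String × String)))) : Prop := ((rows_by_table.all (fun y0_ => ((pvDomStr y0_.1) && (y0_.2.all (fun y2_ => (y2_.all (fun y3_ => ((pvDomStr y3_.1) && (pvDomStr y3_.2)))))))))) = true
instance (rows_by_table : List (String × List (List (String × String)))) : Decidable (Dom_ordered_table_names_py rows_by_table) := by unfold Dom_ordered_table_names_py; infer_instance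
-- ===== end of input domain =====

-- B replaces A's two-pass filter-and-concat by one rank-keyed sorted() pass (objective: alternative, same cost).

-- module constant _PREFERRED_INSERT_ORDER (a tuple of names; used by both versions)
def preferredInsertOrder : List String :=
  ["guild_settings", "dungeons", "raids", "raid_options", "raid_votes",
   "raid_posted_slots", "raid_templates", "raid_attendance", "user_levels",
   "debug_mirror_cache"]

-- ===== PORT A =====
def ordered_table_names_py (rows_by_table : List (String × List (List (String × String)))) : List String × List String :=
  let table_names := (PySem.Dict.ofList rows_by_table).items.map (fun p => p.1)
  let available : PySem.Set String := PySem.Set.ofList table_names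
  let preferred := preferredInsertOrder.filter (fun name => available.contains name)
  let extras := PySem.List.sorted
      (available.filter (fun name => !(PySem.Set.ofList preferredInsertOrder).contains name))
      (fun x => x)
  let insert_order := preferred ++ extras
  let delete_order := insert_order.reverse  -- list(reversed(insert_order)) is list reversal — exact
  (delete_order, insert_order)

-- ===== PORT B =====
def ordered_table_names_py_alt (rows_by_table : List (String × List (List (String × String)))) : List String × List String :=
  let n : Int := (preferredInsertOrder.length : Int)
  let rank : PySem.Dict String Int :=
    (PySem.List.enumerate preferredInsertOrder).foldl
      (fun d p => d.insert p.2 p.1) PySem.Dict.empty   -- {name: i for i, name in enumerate(...)}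
  let insert_order := PySem.List.sorted2
      ((PySem.Dict.ofList rows_by_table).keys)          -- iterating the mapping yields its keys
      (fun name => rank.getD name n)
      (fun name => if rank.contains name then "" else name)
  (insert_order.reverse, insert_order)                  -- insert_order[::-1] is list reversal — exact

-- ===== PRECONDITION & SPEC =====
def Spec_ordered_table_names_py (rows_by_table : List (String × List (List (String × String)))) (out : List String × List String) : Prop := out = ordered_table_names_py_alt rows_by_table
instance (rows_by_table : List (String × List (List (String × String)))) (out : List String × List String) : Decidable (Spec_ordered_table_names_py rows_by_table out) := by unfold Spec_ordered_table_names_py; infer_instance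

-- ===== CLAIM (what is proved, stated in full; the proofs are below) =====
def Claim_equal_ordered_table_names_py : Prop := ∀ (rows_by_table : List (String × List (List (String × String)))), Dom_ordered_table_names_py rows_by_table → Spec_ordered_table_names_py rows_by_table (ordered_table_names_py rows_by_table)

-- ===== LEMMAS AND PROOFS =====

-- B's rank dictionary, as a closed term (what the foldl over enumerate builds).
def rankDict : PySem.Dict String Int :=
  (PySem.List.enumerate preferredInsertOrder).foldl
    (fun d p => d.insert p.2 p.1) PySem.Dict.empty

-- B's sort key, read as one lexicographic key.
def lexKey (name : String) : Lex (Int × String) :=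
  toLex (rankDict.getD name 10, if rankDict.contains name then "" else name)

lemma rankDict_keys : rankDict.keys = preferredInsertOrder := by decide

lemma rankDict_contains_iff (name : String) :
    rankDict.contains name = true ↔ name ∈ preferredInsertOrder := by
  rw [PySem.Dict.contains_iff_mem_keys, rankDict_keys]

lemma lexKey_of_not_mem {name : String} (h : name ∉ preferredInsertOrder) :
    lexKey name = toLex (10, name) := by
  have hc : rankDict.contains name = false := by
    rcases Bool.eq_false_or_eq_true (rankDict.contains name) with hc | hc
    · exact absurd ((rankDict_contains_iff name).mp hc) h
    · exact hc
  simp [lexKey, hc, PySem.Dict.getD_of_not_contains rankDict 10 hc]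

lemma insertBy_congr {α : Type} (f g : α → α → Bool) (h : ∀ a b, f a b = g a b)
    (x : α) (l : List α) : PySem.List.insertBy f x l = PySem.List.insertBy g x l := by
  induction l with
  | nil => rfl
  | cons y ys ih => simp [PySem.List.insertBy, h, ih]

lemma cmp_eq (a b : String) :
    (decide (rankDict.getD a 10 < rankDict.getD b 10) ||
      (!decide (rankDict.getD b 10 < rankDict.getD a 10) &&
        decide ((if rankDict.contains a then "" else a) < (if rankDict.contains b then "" else b))))
    = decide (lexKey a < lexKey b) := by
  rcases lt_trichotomy (rankDict.getD a 10) (rankDict.getD b 10) with h | h | h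
  · simp [lexKey, Prod.Lex.lt_iff, h]
  · simp [lexKey, Prod.Lex.lt_iff, h]
  · simp [lexKey, Prod.Lex.lt_iff, not_lt_of_gt h, h, (ne_of_gt h : _)]

lemma sorted2_eq_sorted_lexKey (xs : List String) :
    PySem.List.sorted2 xs (fun name => rankDict.getD name ((preferredInsertOrder.length : Nat) : Int))
      (fun name => if rankDict.contains name then "" else name)
      = PySem.List.sorted xs lexKey := by
  rw [PySem.List.sorted_eq_foldl_insertBy]
  have h0 : PySem.List.sorted2 xs
      (fun name => rankDict.getD name ((preferredInsertOrder.length : Nat) : Int))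
      (fun name => if rankDict.contains name then "" else name)
      = List.foldl (fun acc x => PySem.List.insertBy
          (fun a b => decide (rankDict.getD a 10 < rankDict.getD b 10) ||
            (!decide (rankDict.getD b 10 < rankDict.getD a 10) &&
              decide ((if rankDict.contains a then "" else a) < (if rankDict.contains b then "" else b))))
          x acc) [] xs := rfl
  rw [h0]
  have hf : (fun (acc : List String) x => PySem.List.insertBy
      (fun a b => decide (rankDict.getD a 10 < rankDict.getD b 10) ||
        (!decide (rankDict.getD b 10 < rankDict.getD a 10) &&
          decide ((if rankDict.contains a then "" else a) < (if rankDict.contains b then "" else b))))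
      x acc)
      = (fun (acc : List String) x => PySem.List.insertBy (fun a b => decide (lexKey a < lexKey b)) x acc) := by
    funext acc x
    exact insertBy_congr _ _ cmp_eq x acc
  rw [hf]

-- A's insert_order, written over the raw key list xs.
def aOrder (xs : List String) : List String :=
  preferredInsertOrder.filter (fun n => decide (n ∈ xs))
    ++ PySem.List.sorted (xs.filter (fun n => !decide (n ∈ preferredInsertOrder))) (fun x => x)

lemma aOrder_perm (xs : List String) (h : xs.Nodup) : (aOrder xs).Perm xs := by
  have hpa : (preferredInsertOrder.filter (fun n => decide (n ∈ xs))).Perm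
      (xs.filter (fun n => decide (n ∈ preferredInsertOrder))) := by
    rw [List.perm_ext_iff_of_nodup
      ((by decide : preferredInsertOrder.Nodup).filter _) (h.filter _)]
    intro a
    simp [List.mem_filter, and_comm]
  have hpb := PySem.List.sorted_perm
    (xs.filter (fun n => !decide (n ∈ preferredInsertOrder))) (fun x => x) false
  exact (hpa.append hpb).trans (List.filter_append_perm _ xs)

lemma aOrder_pairwise (xs : List String) (h : xs.Nodup) :
    (aOrder xs).Pairwise (fun a b => lexKey a < lexKey b) := by
  rw [aOrder, List.pairwise_append]
  refine ⟨?_, ?_, ?_⟩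
  · exact List.Pairwise.sublist List.filter_sublist
      (by decide : preferredInsertOrder.Pairwise (fun a b => lexKey a < lexKey b))
  · have hle := PySem.List.sorted_pairwise
      (xs.filter (fun n => !decide (n ∈ preferredInsertOrder))) (fun x => x)
    have hnd : (PySem.List.sorted (xs.filter (fun n => !decide (n ∈ preferredInsertOrder)))
        (fun x => x)).Nodup :=
      ((PySem.List.sorted_perm _ _ false).nodup_iff).mpr (h.filter _)
    refine (hle.and hnd).imp_of_mem ?_
    intro a b ha hb hab
    have ha' : a ∉ preferredInsertOrder := by
      have := (PySem.List.mem_sorted _ _ _ _).mp ha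
      simp [List.mem_filter] at this
      exact this.2
    have hb' : b ∉ preferredInsertOrder := by
      have := (PySem.List.mem_sorted _ _ _ _).mp hb
      simp [List.mem_filter] at this
      exact this.2
    rw [lexKey_of_not_mem ha', lexKey_of_not_mem hb']
    rw [Prod.Lex.lt_iff]
    exact Or.inr ⟨rfl, lt_of_le_of_ne hab.1 hab.2⟩
  · intro a ha b hb
    have ha' : a ∈ preferredInsertOrder := (List.mem_filter.mp ha).1
    have hb' : b ∉ preferredInsertOrder := by
      have := (PySem.List.mem_sorted _ _ _ _).mp hb
      simp [List.mem_filter] at this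
      exact this.2
    rw [lexKey_of_not_mem hb', lexKey, Prod.Lex.lt_iff]
    exact Or.inl ((by decide : ∀ x ∈ preferredInsertOrder, rankDict.getD x 10 < 10) a ha')

lemma insert_order_eq (xs : List String) (h : xs.Nodup) :
    preferredInsertOrder.filter (fun name => (PySem.Set.ofList xs).contains name)
      ++ PySem.List.sorted
          ((PySem.Set.ofList xs).filter (fun name => !(PySem.Set.ofList preferredInsertOrder).contains name))
          (fun x => x)
    = PySem.List.sorted2 xs
        (fun name => rankDict.getD name ((preferredInsertOrder.length : Nat) : Int))
        (fun name => if rankDict.contains name then "" else name) := by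
  rw [sorted2_eq_sorted_lexKey,
      PySem.List.sorted_eq_of_perm_of_pairwise_lt xs (aOrder xs) lexKey (aOrder_perm xs h) (aOrder_pairwise xs h),
      PySem.Set.ofList_eq_self_of_nodup xs h, aOrder]
  congr 1
  · apply List.filter_congr
    intro n _
    rw [PySem.Set.contains_eq_decide]
  · congr 1
    apply List.filter_congr
    intro n _
    have : (PySem.Set.ofList preferredInsertOrder).contains n = decide (n ∈ preferredInsertOrder) := by
      rw [PySem.Set.contains_eq_decide]
      exact decide_eq_decide.mpr (PySem.Set.mem_ofList preferredInsertOrder n)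
    rw [this]

-- ===== VERDICT (by name: the statement is the Claim_ definition above) =====
theorem ordered_table_names_py_spec : Claim_equal_ordered_table_names_py := by
  intro rbt _
  show ordered_table_names_py rbt = ordered_table_names_py_alt rbt
  simp only [ordered_table_names_py, ordered_table_names_py_alt]
  have hkeys : (PySem.Dict.ofList rbt).items.map (fun p => p.1) = (PySem.Dict.ofList rbt).keys := rfl
  rw [hkeys, insert_order_eq _ (PySem.Dict.nodup_keys_ofList rbt)]
  rfl
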